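-- pv_equiv track=rewrite | github.com/treejamie/hackerrank-90days | wk4/numbers.py | pickingNumbers1
-- ===== SOURCE A (Python) =====
-- def pickingNumbers1(a):
--     # sort it first
--     # a.sort()
--
--     # set variabls up
--     i = 0
--     l = len(a) - 1
--     ml = 1
--     subs = []
--
--     # now loop
--     while i <= l:
--         # this the end? (beautiful friend, the end...)
--         if i ==  l:
--             subs.append(ml)  # bank the current max length cos the party is over
--             ml = 1
--             break
--
--         # is next thing less than one?
--         if a[i + 1] - a[i] <= 1:
--             ml += 1          # increment the max length
--         else:
--             # nope, we reached the end of the streak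
--             subs.append(ml)  # bank it
--             ml = 1           # reset the length
--
--         # increment the index
--         i += 1
--
--     # le done
--     return max(subs)
-- ===== SOURCE B (Python) =====
-- def _leading_true(steps, i):
--     # length of the block of True values in steps starting at position i
--     k = 0
--     n = len(steps)
--     while i + k < n and steps[i + k]:
--         k += 1
--     return k
--
--
-- def pickingNumbers1(a):
--     # table of adjacent "steps": does a[i+1] follow a[i] by at most 1 (signed)?
--     steps = [y - x <= 1 for x, y in zip(a, a[1:])]
--     # longest run of True in steps, found by jumping run to run
--     best = 0
--     i = 0
--     n = len(steps)
--     while i < n: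
--         if steps[i]:
--             k = _leading_true(steps, i)
--             best = max(best, k)
--             i += k
--         else:
--             i += 1
--     return best + 1
-- ===== Notes on version B (the rewrite author's own statement) =====
-- stated objective: alternative
-- what changed: A walks the array by index, banking each finished run length into a subs list and taking max(subs) at the end; B first builds the adjacent-step boolean table via zip, then finds the longest run of True by jumping run to run over that table and returns it + 1.
-- outside the precondition, e.g. on pickingNumbers1([]): A raises ValueError, B returns 1
import Mathlib
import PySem

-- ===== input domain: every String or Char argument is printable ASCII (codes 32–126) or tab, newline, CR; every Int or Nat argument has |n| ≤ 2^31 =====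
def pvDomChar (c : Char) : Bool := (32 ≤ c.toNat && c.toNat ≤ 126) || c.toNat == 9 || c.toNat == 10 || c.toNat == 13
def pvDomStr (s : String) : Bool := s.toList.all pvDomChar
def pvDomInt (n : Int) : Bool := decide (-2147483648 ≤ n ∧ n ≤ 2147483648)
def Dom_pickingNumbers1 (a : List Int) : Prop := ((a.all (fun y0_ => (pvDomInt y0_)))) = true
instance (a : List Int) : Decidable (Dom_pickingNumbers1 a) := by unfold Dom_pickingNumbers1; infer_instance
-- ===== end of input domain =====

-- B replaces A's banked-run-lengths list + final max with a two-pass scheme: an adjacent-step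
-- boolean table (via zip) followed by a run-to-run jump scan for the longest True run; objective: alternative.


-- ===== PORT A =====
-- A's while loop over the index i; a[i] / a[i+1] are always in range inside the loop, so
-- pyGetD with default 0 is exact there.
def pvA_loop (a : List Int) (i ml : Int) (subs : List Int) : List Int :=
  if _h : i ≤ (a.length : Int) - 1 then
    if i = (a.length : Int) - 1 then subs ++ [ml]
    else if PySem.List.pyGetD a (i + 1) 0 - PySem.List.pyGetD a i 0 ≤ 1 then
      pvA_loop a (i + 1) (ml + 1) subs
    else
      pvA_loop a (i + 1) 1 (subs ++ [ml])
  else subs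
termination_by ((a.length : Int) - i).toNat
decreasing_by all_goals omega

def pickingNumbers1 (a : List Int) : Int :=
  (PySem.List.max? (pvA_loop a 0 1 []) (fun y => y)).getD 0

-- ===== PORT B =====
-- helper _leading_true of Source B: k is the while-loop accumulator, entered with k = 0.
-- fuel is only a structural totality guard; fuel = steps.length is enough for every entry
-- (the loop adds 1 to k per step and stops once i + k reaches len(steps)).
def pvLeadF (steps : List Bool) (fuel : Nat) (i k : Int) : Int :=
  match fuel with
  | 0 => k
  | fuel + 1 =>
    if i + k < (steps.length : Int) ∧ PySem.List.pyGetD steps (i + k) false = true then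
      pvLeadF steps fuel i (k + 1)
    else k

def pvLead (steps : List Bool) (i : Int) : Int := pvLeadF steps steps.length i 0

-- the while loop of Source B over the step table, jumping run to run by index;
-- fuel = steps.length again bounds the number of iterations (i grows by ≥ 1 per turn).
def pvB_loopF (steps : List Bool) (fuel : Nat) (i best : Int) : Int :=
  match fuel with
  | 0 => best
  | fuel + 1 =>
    if i < (steps.length : Int) then
      if PySem.List.pyGetD steps i false = true then
        pvB_loopF steps fuel (i + pvLead steps i) (max best (pvLead steps i))
      else pvB_loopF steps fuel (i + 1) best
    else best

def pickingNumbers1_alt (a : List Int) : Int :=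
  pvB_loopF ((a.zip (a.drop 1)).map (fun p => decide (p.2 - p.1 ≤ 1)))
    ((a.zip (a.drop 1)).map (fun p => decide (p.2 - p.1 ≤ 1))).length 0 0 + 1

-- ===== PRECONDITION & SPEC =====
-- Pre_ excludes only the empty list, on which A's max([]) raises ValueError.
def Pre_pickingNumbers1 (a : List Int) : Prop := a ≠ []
instance (a : List Int) : Decidable (Pre_pickingNumbers1 a) := by unfold Pre_pickingNumbers1; infer_instance
def pvWitness_pickingNumbers1 : List Int := [3, 4, 6]

def Spec_pickingNumbers1 (a : List Int) (out : Int) : Prop := out = pickingNumbers1_alt a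
instance (a : List Int) (out : Int) : Decidable (Spec_pickingNumbers1 a out) := by unfold Spec_pickingNumbers1; infer_instance

-- ===== CLAIM (what is proved, stated in full; the proofs are below) =====
def Claim_equal_pickingNumbers1 : Prop := ∀ (a : List Int), Dom_pickingNumbers1 a → Pre_pickingNumbers1 a → Spec_pickingNumbers1 a (pickingNumbers1 a)
-- ===== LEMMAS AND PROOFS =====

-- leading-True count of a boolean list (abstract form of _leading_true)
def pvCnt : List Bool → Nat
  | [] => 0
  | b :: t => if b then pvCnt t + 1 else 0

-- abstract suffix form of Source B's while loop
def pvScan : List Bool → Int → Int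
  | [], best => best
  | b :: t, best =>
    if b then
      pvScan ((b :: t).drop (pvCnt (b :: t))) (max best ((pvCnt (b :: t)) : Int))
    else
      pvScan t best
termination_by bs => bs.length
decreasing_by
  · rename_i h
    subst h
    have hc : pvCnt (true :: t) = pvCnt t + 1 := by simp [pvCnt]
    rw [hc, List.drop_succ_cons, List.length_drop, List.length_cons]
    omega
  · rw [List.length_cons]
    omega


-- the step table of a list
def pvSteps (s : List Int) : List Bool :=
  (s.zip (s.drop 1)).map (fun p => decide (p.2 - p.1 ≤ 1))

@[simp] lemma pvSteps_cons_cons (x y : Int) (t : List Int) :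
    pvSteps (x :: y :: t) = decide (y - x ≤ 1) :: pvSteps (y :: t) := by
  simp [pvSteps]

-- abstract version of A's loop over the step table
def pvBanks : List Bool → Int → List Int → List Int
  | [], ml, subs => subs ++ [ml]
  | b :: t, ml, subs => if b then pvBanks t (ml + 1) subs else pvBanks t 1 (subs ++ [ml])

lemma pvBanks_append (bs : List Bool) : ∀ (ml : Int) (subs : List Int),
    pvBanks bs ml subs = subs ++ pvBanks bs ml [] := by
  induction bs with
  | nil => intro ml subs; simp [pvBanks]
  | cons b t ih =>
    intro ml subs
    cases b
    · simp only [pvBanks, Bool.false_eq_true, ite_false, List.nil_append]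
      rw [ih 1 (subs ++ [ml]), ih 1 [ml], List.append_assoc]
    · simp only [pvBanks, if_pos]
      exact ih (ml + 1) subs

lemma pvBanks_jump (bs : List Bool) : ∀ (ml : Int) (subs : List Int),
    pvBanks bs ml subs = pvBanks (bs.drop (pvCnt bs)) (ml + pvCnt bs) subs := by
  induction bs with
  | nil => intro ml subs; simp [pvCnt]
  | cons b t ih =>
    intro ml subs
    by_cases hb : b = true
    · have : pvCnt (b :: t) = pvCnt t + 1 := by simp [pvCnt, hb]
      rw [this]
      simp [pvBanks, hb]
      rw [ih]
      congr 1
      omega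
    · simp at hb
      simp [pvCnt, hb]

lemma pvCnt_le_length (bs : List Bool) : pvCnt bs ≤ bs.length := by
  induction bs with
  | nil => simp [pvCnt]
  | cons b t ih =>
    by_cases hb : b = true
    · simp [pvCnt, hb]; omega
    · simp [pvCnt, hb]

lemma drop_cnt_shape (bs : List Bool) :
    bs.drop (pvCnt bs) = [] ∨ ∃ t, bs.drop (pvCnt bs) = false :: t := by
  induction bs with
  | nil => left; simp
  | cons b t ih =>
    by_cases hb : b = true
    · simpa [pvCnt, hb] using ih
    · simp at hb; right; exact ⟨t, by simp [pvCnt, hb]⟩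

@[simp] lemma pvScan_nil (best : Int) : pvScan [] best = best := by
  rw [pvScan.eq_def]

lemma pvScan_false (t : List Bool) (best : Int) : pvScan (false :: t) best = pvScan t best := by
  rw [pvScan.eq_def]
  simp

lemma pvScan_true (t : List Bool) (best : Int) : pvScan (true :: t) best =
    pvScan ((true :: t).drop (pvCnt (true :: t))) (max best ((pvCnt (true :: t)) : Int)) := by
  rw [pvScan.eq_def]
  simp

lemma pvScan_eq (bs : List Bool) (best : Int) (hb : 0 ≤ best) :
    pvScan bs best = pvScan (bs.drop (pvCnt bs)) (max best ((pvCnt bs) : Int)) := by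
  cases bs with
  | nil =>
    simp [pvCnt]
    omega
  | cons b t =>
    cases b
    · have h0 : pvCnt (false :: t) = 0 := by simp [pvCnt]
      rw [h0]
      norm_num [max_eq_left hb]
    · exact pvScan_true t best

-- main invariant: fold-max over the banked list vs. B's jump scan
lemma pvMain : ∀ (n : ℕ) (bs : List Bool), bs.length ≤ n → ∀ (best : Int), 0 ≤ best →
    (pvBanks bs 1 []).foldl max (best + 1) = pvScan bs best + 1 := by
  intro n
  induction n with
  | zero =>
    intro bs hn best hb
    have : bs = [] := by cases bs <;> simp_all
    subst this
    simp [pvBanks]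
    omega
  | succ n ih =>
    intro bs hn best hb
    rw [pvBanks_jump bs 1 [], pvScan_eq bs best hb]
    rcases drop_cnt_shape bs with h | ⟨t, h⟩
    · rw [h]
      simp [pvBanks]
      omega
    · have hcnt : pvCnt bs ≤ bs.length := pvCnt_le_length bs
      have hlen : t.length ≤ n := by
        have := congrArg List.length h
        simp [List.length_drop] at this
        omega
      rw [h, pvScan_false]
      have hstep : pvBanks (false :: t) (1 + (pvCnt bs : Int)) [] = (1 + (pvCnt bs : Int)) :: pvBanks t 1 [] := by
        simp only [pvBanks, Bool.false_eq_true, ite_false, List.nil_append]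
        rw [pvBanks_append t 1 [1 + (pvCnt bs : Int)]]
        simp
      rw [hstep, List.foldl_cons]
      have h1 : max (best + 1) (1 + (pvCnt bs : Int)) = max best ((pvCnt bs) : Int) + 1 := by omega
      rw [h1]
      exact ih t hlen _ (by omega)

-- bridge: A's index loop equals pvBanks over the step table of the remaining suffix
lemma pvA_bridge : ∀ (s : List Int) (a : List Int) (i ml : Int) (subs : List Int),
    0 ≤ i → a.drop i.toNat = s → s ≠ [] →
    pvA_loop a i ml subs = pvBanks (pvSteps s) ml subs := by
  intro s
  induction s with
  | nil => intro a i ml subs _ _ hne; exact absurd rfl hne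
  | cons x t ih =>
    intro a i ml subs hi hdrop _
    have hlt : i.toNat < a.length := by
      have := congrArg List.length hdrop
      simp at this
      omega
    cases t with
    | nil =>
      -- last element: i = len - 1
      have hlast : i = (a.length : Int) - 1 := by
        have := congrArg List.length hdrop
        simp at this
        omega
      rw [pvA_loop]
      simp [hlast, pvSteps, pvBanks]
    | cons y t2 =>
      have hne : i ≠ (a.length : Int) - 1 := by
        have := congrArg List.length hdrop
        simp at this
        omega
      have hle : i ≤ (a.length : Int) - 1 := by omega
      have hx? : a[i.toNat]? = some x := by
        have h0 : (a.drop i.toNat)[0]? = some x := by rw [hdrop]; rfl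
        rw [List.getElem?_drop] at h0
        simpa using h0
      have hy? : a[i.toNat + 1]? = some y := by
        have h1 : (a.drop i.toNat)[1]? = some y := by rw [hdrop]; rfl
        rw [List.getElem?_drop] at h1
        exact h1
      have hgi : PySem.List.pyGetD a i 0 = x := by
        have hi' : i = ((i.toNat : Nat) : Int) := by omega
        rw [hi', PySem.List.pyGetD_natCast]
        simp [List.getD_eq_getElem?_getD, hx?]
      have hgi1 : PySem.List.pyGetD a (i + 1) 0 = y := by
        have hi' : i + 1 = ((i.toNat + 1 : Nat) : Int) := by omega
        rw [hi', PySem.List.pyGetD_natCast]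
        simp [List.getD_eq_getElem?_getD, hy?]
      have hdrop1 : a.drop (i + 1).toNat = y :: t2 := by
        have : (i + 1).toNat = i.toNat + 1 := by omega
        rw [this, ← List.drop_drop, hdrop]
        simp
      rw [pvA_loop]
      rw [dif_pos hle, if_neg hne, hgi, hgi1, pvSteps_cons_cons, pvBanks]
      by_cases hc : y - x ≤ 1
      · rw [if_pos hc, if_pos (by simp [hc])]
        exact ih a (i + 1) (ml + 1) subs (by omega) hdrop1 (by simp)
      · rw [if_neg hc, if_neg (by simp [hc])]
        exact ih a (i + 1) 1 (subs ++ [ml]) (by omega) hdrop1 (by simp)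

lemma pvBanks_head_ge (bs : List Bool) : ∀ (ml : Int),
    ∃ x xs, pvBanks bs ml [] = x :: xs ∧ ml ≤ x := by
  induction bs with
  | nil => intro ml; exact ⟨ml, [], by simp [pvBanks], le_rfl⟩
  | cons b t ih =>
    intro ml
    cases b
    · refine ⟨ml, pvBanks t 1 [], ?_, le_rfl⟩
      simp only [pvBanks, Bool.false_eq_true, ite_false, List.nil_append]
      rw [pvBanks_append t 1 [ml]]
      simp
    · obtain ⟨x, xs, hxx, hle⟩ := ih (ml + 1)
      exact ⟨x, xs, by simpa [pvBanks] using hxx, by omega⟩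

lemma pvLeadF_spec : ∀ (fuel : ℕ) (steps : List Bool) (i k : Int), 0 ≤ i → 0 ≤ k →
    ((steps.length : Int) - (i + k)).toNat ≤ fuel →
    pvLeadF steps fuel i k = k + (pvCnt (steps.drop (i + k).toNat) : Int) := by
  intro fuel
  induction fuel with
  | zero =>
    intro steps i k hi hk hn
    have hge : steps.length ≤ (i + k).toNat := by omega
    rw [List.drop_eq_nil_of_le hge]
    simp [pvLeadF, pvCnt]
  | succ n ih =>
    intro steps i k hi hk hn
    rw [pvLeadF]
    split
    · rename_i h
      obtain ⟨hlt, hget⟩ := h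
      have hr : (i + k).toNat < steps.length := by omega
      have hcast : i + k = (((i + k).toNat : Nat) : Int) := by omega
      rw [hcast, PySem.List.pyGetD_natCast] at hget
      rw [List.getD_eq_getElem _ _ hr] at hget
      have hdec : steps.drop (i + k).toNat = steps[(i + k).toNat] :: steps.drop ((i + k).toNat + 1) :=
        List.drop_eq_getElem_cons hr
      rw [ih steps i (k + 1) hi (by omega) (by omega)]
      rw [hdec, hget]
      have h1 : (i + (k + 1)).toNat = (i + k).toNat + 1 := by omega
      rw [h1]
      simp [pvCnt]
      omega
    · rename_i h
      by_cases hge : steps.length ≤ (i + k).toNat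
      · rw [List.drop_eq_nil_of_le hge]
        simp [pvCnt]
      · have hr : (i + k).toNat < steps.length := by omega
        have hget : PySem.List.pyGetD steps (i + k) false = false := by
          rcases Bool.eq_false_or_eq_true (PySem.List.pyGetD steps (i + k) false) with hh | hh
          · exact absurd ⟨by omega, hh⟩ h
          · exact hh
        have hcast : i + k = (((i + k).toNat : Nat) : Int) := by omega
        rw [hcast, PySem.List.pyGetD_natCast] at hget
        rw [List.getD_eq_getElem _ _ hr] at hget
        have hdec : steps.drop (i + k).toNat = steps[(i + k).toNat] :: steps.drop ((i + k).toNat + 1) :=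
          List.drop_eq_getElem_cons hr
        rw [hdec, hget]
        simp [pvCnt]

lemma pvLead_cnt (steps : List Bool) (i : Int) (hi : 0 ≤ i) :
    pvLead steps i = (pvCnt (steps.drop i.toNat) : Int) := by
  have := pvLeadF_spec steps.length steps i 0 hi le_rfl (by omega)
  simpa using this

lemma pvB_bridge : ∀ (fuel : ℕ) (steps : List Bool) (i best : Int), 0 ≤ i → 0 ≤ best →
    ((steps.length : Int) - i).toNat ≤ fuel →
    pvB_loopF steps fuel i best = pvScan (steps.drop i.toNat) best := by
  intro fuel
  induction fuel with
  | zero =>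
    intro steps i best hi hb hn
    rw [List.drop_eq_nil_of_le (by omega : steps.length ≤ i.toNat)]
    simp [pvB_loopF]
  | succ n ih =>
    intro steps i best hi hb hn
    rw [pvB_loopF]
    by_cases hlt : i < (steps.length : Int)
    · rw [if_pos hlt]
      have hr : i.toNat < steps.length := by omega
      have hdec : steps.drop i.toNat = steps[i.toNat] :: steps.drop (i.toNat + 1) :=
        List.drop_eq_getElem_cons hr
      have hlead := pvLead_cnt steps i hi
      by_cases hs : PySem.List.pyGetD steps i false = true
      · rw [if_pos hs]
        have hgetb : steps[i.toNat] = true := by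
          have hcast : i = ((i.toNat : Nat) : Int) := by omega
          rw [hcast, PySem.List.pyGetD_natCast, List.getD_eq_getElem _ _ hr] at hs
          exact hs
        have hcpos : 1 ≤ pvCnt (steps.drop i.toNat) := by
          rw [hdec, hgetb]
          simp [pvCnt]
        rw [hlead]
        rw [ih steps (i + (pvCnt (steps.drop i.toNat) : Int)) _ (by omega) (by omega) (by omega)]
        rw [pvScan_eq (steps.drop i.toNat) best hb, List.drop_drop]
        have harg : (i + (pvCnt (steps.drop i.toNat) : Int)).toNat
            = pvCnt (steps.drop i.toNat) + i.toNat := by omega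
        rw [harg, Nat.add_comm]
      · rw [if_neg hs]
        have hgetb : steps[i.toNat] = false := by
          have hcast : i = ((i.toNat : Nat) : Int) := by omega
          rcases Bool.eq_false_or_eq_true steps[i.toNat] with hh | hh
          · exfalso
            apply hs
            rw [hcast, PySem.List.pyGetD_natCast, List.getD_eq_getElem _ _ hr]
            exact hh
          · exact hh
        rw [ih steps (i + 1) best (by omega) hb (by omega)]
        rw [hdec, hgetb, pvScan_false]
        have harg : (i + 1).toNat = i.toNat + 1 := by omega
        rw [harg]
    · rw [if_neg hlt]
      rw [List.drop_eq_nil_of_le (by omega : steps.length ≤ i.toNat)]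
      simp

-- ===== VERDICT (by name: the statement is the Claim_ definition above) =====
theorem pickingNumbers1_spec : Claim_equal_pickingNumbers1 := by
  unfold Claim_equal_pickingNumbers1
  intro a _ hpre
  unfold Spec_pickingNumbers1 Pre_pickingNumbers1 at *
  unfold pickingNumbers1 pickingNumbers1_alt
  have hbridge : pvA_loop a 0 1 [] = pvBanks (pvSteps a) 1 [] :=
    pvA_bridge a a 0 1 [] le_rfl (by simp) hpre
  rw [hbridge]
  obtain ⟨x, xs, hx, hge⟩ := pvBanks_head_ge (pvSteps a) 1
  rw [hx, PySem.List.max?_id_cons]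
  have hmain := pvMain (pvSteps a).length (pvSteps a) le_rfl 0 le_rfl
  rw [hx] at hmain
  simp only [List.foldl_cons] at hmain
  have h01 : max ((0 : Int) + 1) x = x := by omega
  rw [h01] at hmain
  have hB : pvB_loopF (pvSteps a) (pvSteps a).length 0 0 = pvScan (pvSteps a) 0 := by
    have := pvB_bridge (pvSteps a).length (pvSteps a) 0 0 le_rfl le_rfl (by simp)
    simpa using this
  rw [← hB] at hmain
  simpa [pvSteps] using hmain
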